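-- pv_equiv track=rewrite | github.com/pypi-data/pypi-mirror-341 | packages/gtgt/gtgt-0.2.1-py3-none-any.whl/gtgt/range.py | _to_range
-- ===== SOURCE A (Python) =====
-- from typing import Tuple, List, Set
--
-- Range = Tuple[int, int]
--
-- def _to_range(numbers: Set[int]) -> List[Range]:
--     """Convert a set of numbers to a range[start, end)"""
--     # Make sure the numbers are sorted
--     _numbers = sorted(numbers)
--
--     # If there are no _numbers
--     if not _numbers:
--         return list()
--
--     # If there is only a single number
--     if len(_numbers) == 1:
--         i = _numbers[0]
--         return [(i, i + 1)]
--
--     # Initialise the start and previous number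
--     start = prev = _numbers[0]
--
--     # Store the ranges we found
--     ranges = list()
--
--     # Process all _numbers
--     for i in _numbers[1:]:
--         if i == prev + 1:
--             prev = i
--         else:
--             ranges.append((start, prev + 1))
--             start = prev = i
--     ranges.append((start, prev + 1))
--
--     return ranges
-- ===== SOURCE B (Python) =====
-- from itertools import groupby
-- from typing import Tuple, List, Set
--
-- Range = Tuple[int, int]
--
-- def _to_range(numbers: Set[int]) -> List[Range]:
--     """Convert a set of numbers to a range[start, end)"""
--     ranges = []
--     for _, grp in groupby(enumerate(sorted(numbers)), key=lambda p: p[1] - p[0]):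
--         vals = [v for _, v in grp]
--         ranges.append((vals[0], vals[-1] + 1))
--     return ranges
-- ===== Notes on version B (the rewrite author's own statement) =====
-- stated objective: idiomatic
-- what changed: Replaces the manual start/prev state machine with its empty- and singleton-input special cases by itertools.groupby over enumerate(sorted(numbers)) keyed on value-minus-index, emitting (first, last+1) per maximal consecutive run.
import Mathlib
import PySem

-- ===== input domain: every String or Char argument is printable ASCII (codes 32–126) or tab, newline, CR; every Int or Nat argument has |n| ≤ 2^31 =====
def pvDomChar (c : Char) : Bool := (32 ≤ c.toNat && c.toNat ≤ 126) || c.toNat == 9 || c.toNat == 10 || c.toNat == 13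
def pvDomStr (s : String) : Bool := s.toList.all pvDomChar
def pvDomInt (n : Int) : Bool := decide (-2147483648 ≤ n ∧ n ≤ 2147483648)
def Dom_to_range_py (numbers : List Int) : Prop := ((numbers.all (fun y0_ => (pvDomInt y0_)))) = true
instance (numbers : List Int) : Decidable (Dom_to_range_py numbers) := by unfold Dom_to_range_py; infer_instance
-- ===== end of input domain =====

-- B replaces A's manual start/prev state machine (with its empty/singleton special cases)
-- by a groupby over enumerate(sorted(numbers)) keyed on value-minus-index (idiomatic rewrite).


-- ===== PORT A =====
-- literal transliteration of A: sort, empty/singleton branches, then the start/prev fold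
def to_range_py (numbers : List Int) : List (Int × Int) :=
  let _numbers := PySem.List.sorted numbers (fun x => x)
  match _numbers with
  | [] => []
  | [i] => [(i, i + 1)]
  | x :: rest =>
    let s := rest.foldl
      (fun (st : Int × Int × List (Int × Int)) i =>
        if i = st.2.1 + 1 then (st.1, i, st.2.2)
        else (i, i, st.2.2 ++ [(st.1, st.2.1 + 1)]))
      (x, x, ([] : List (Int × Int)))
    s.2.2 ++ [(s.1, s.2.1 + 1)]

-- ===== PORT B =====
-- B-side helper: itertools.groupby over the (index, value) pairs with key v - i,
-- carrying the current key and the current group's values (the enumerate counter is i).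
def pvGroupsGo (k : Int) (cur : List Int) (i : Int) (vs : List Int) : List (List Int) :=
  match vs with
  | [] => [cur]
  | v :: rest =>
    if v - i = k then pvGroupsGo k (cur ++ [v]) (i + 1) rest
    else cur :: pvGroupsGo (v - i) [v] (i + 1) rest

def pvGroups (vs : List Int) : List (List Int) :=
  match vs with
  | [] => []
  | v :: rest => pvGroupsGo (v - 0) [v] 1 rest

-- port of B: one (start, end) pair per maximal consecutive run of the sorted input
def to_range_py_alt (numbers : List Int) : List (Int × Int) :=
  (pvGroups (PySem.List.sorted numbers (fun x => x))).map
    (fun vals => (vals.headD 0, vals.getLastD 0 + 1))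

-- ===== PRECONDITION & SPEC =====
def Spec_to_range_py (numbers : List Int) (out : List (Int × Int)) : Prop := out = to_range_py_alt numbers
instance (numbers : List Int) (out : List (Int × Int)) : Decidable (Spec_to_range_py numbers out) := by unfold Spec_to_range_py; infer_instance

-- ===== CLAIM (what is proved, stated in full; the proofs are below) =====
def Claim_equal_to_range_py : Prop := ∀ (numbers : List Int), Dom_to_range_py numbers → Spec_to_range_py numbers (to_range_py numbers)

-- ===== LEMMAS AND PROOFS =====

-- A's fold (with the trailing append) equals B's grouping, for any tail, generalized
-- over the loop state: cur is the current group (nonempty, head = start, last = prev)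
-- and k = prev - (i - 1) is its groupby key.
theorem pv_go_eq (vs : List Int) : ∀ (i k start prev : Int) (ranges : List (Int × Int)) (cur : List Int),
    cur ≠ [] → cur.headD 0 = start → cur.getLastD 0 = prev → k = prev - (i - 1) →
    (let s := vs.foldl
        (fun (st : Int × Int × List (Int × Int)) j =>
          if j = st.2.1 + 1 then (st.1, j, st.2.2)
          else (j, j, st.2.2 ++ [(st.1, st.2.1 + 1)]))
        (start, prev, ranges)
     s.2.2 ++ [(s.1, s.2.1 + 1)]) =
    ranges ++ (pvGroupsGo k cur i vs).map (fun vals => (vals.headD 0, vals.getLastD 0 + 1)) := by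
  induction vs with
  | nil =>
    intro i k start prev ranges cur hne hh hl hk
    subst hh; subst hl
    simp [pvGroupsGo, List.headD_eq_head?, List.getLastD_eq_getLast?]
  | cons v rest ih =>
    intro i k start prev ranges cur hne hh hl hk
    by_cases hv : v = prev + 1
    · have hcond : v - i = k := by omega
      simp only [pvGroupsGo, List.foldl_cons]
      rw [if_pos hv, if_pos hcond]
      exact ih (i + 1) k start v ranges (cur ++ [v])
        (by simp)
        (by cases cur with
            | nil => exact absurd rfl hne
            | cons a t => simpa using hh)
        (by simp) (by omega)
    · have hcond : ¬ (v - i = k) := by omega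
      simp only [pvGroupsGo, List.foldl_cons]
      rw [if_neg hv, if_neg hcond, List.map_cons, hh, hl,
        show ranges ++ (start, prev + 1) ::
            (pvGroupsGo (v - i) [v] (i + 1) rest).map
              (fun vals => (vals.headD 0, vals.getLastD 0 + 1)) =
          (ranges ++ [(start, prev + 1)]) ++
            (pvGroupsGo (v - i) [v] (i + 1) rest).map
              (fun vals => (vals.headD 0, vals.getLastD 0 + 1)) by simp]
      exact ih (i + 1) (v - i) v v (ranges ++ [(start, prev + 1)]) [v]
        (by simp) (by simp) (by simp) (by omega)

-- ===== VERDICT (by name: the statement is the Claim_ definition above) =====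
theorem to_range_py_spec : Claim_equal_to_range_py := by
  intro numbers _
  unfold Spec_to_range_py to_range_py to_range_py_alt
  cases h : PySem.List.sorted numbers (fun x => x) with
  | nil => rfl
  | cons x rest =>
    cases rest with
    | nil => rfl
    | cons y t =>
      have := pv_go_eq (y :: t) 1 (x - 0) x x [] [x] (by simp) (by simp) (by simp) (by omega)
      simp only [List.nil_append] at this
      exact this
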